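-- pv_equiv track=rewrite | github.com/jinyeong-afk/Programmers-Algorithms | ExhaustiveSearch_Level1.py | solution
-- ===== SOURCE A (Python) =====
-- def solution(answers):
--     answer = []
--     answer1 = [1,2,3,4,5]
--     answer2 = [2,1,2,3,2,4,2,5]
--     answer3 = [3,3,1,1,2,2,4,4,5,5]
--     score = [0,0,0]
--     for idx, ans in enumerate(answers):
--         if ans == answer1[idx%len(answer1)]:
--             score[0] += 1
--         if ans == answer2[idx%len(answer2)]:
--             score[1] += 1
--         if ans == answer3[idx%len(answer3)]:
--             score[2] += 1
--
--     for idx2, sco in enumerate(score):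
--         if sco == max(score):
--             answer.append(idx2+1)
--     return answer
-- ===== SOURCE B (Python) =====
-- def solution(answers):
--     # Frequency table keyed by (index mod 40, answer); 40 = lcm of the three
--     # pattern lengths, so a position's match status for every pattern depends
--     # only on its index mod 40.  Scores are then read off the table; the main
--     # pass never compares against a pattern.
--     freq = {}
--     for i, a in enumerate(answers):
--         key = (i % 40, a)
--         freq[key] = freq.get(key, 0) + 1
--     patterns = [[1, 2, 3, 4, 5],
--                 [2, 1, 2, 3, 2, 4, 2, 5],
--                 [3, 3, 1, 1, 2, 2, 4, 4, 5, 5]]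
--     scores = [sum(freq.get((r, p[r % len(p)]), 0) for r in range(40))
--               for p in patterns]
--     best = max(scores)
--     return [k + 1 for k in range(3) if scores[k] == best]
-- ===== Notes on version B (the rewrite author's own statement) =====
-- stated objective: alternative
-- what changed: B builds a frequency table keyed by (index mod 40, answer) in one counting pass (40 = lcm of the pattern lengths) and reads each pattern's score off the table with 40 lookups, replacing A's per-element comparison against three cyclic patterns with interleaved counters.
import Mathlib
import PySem

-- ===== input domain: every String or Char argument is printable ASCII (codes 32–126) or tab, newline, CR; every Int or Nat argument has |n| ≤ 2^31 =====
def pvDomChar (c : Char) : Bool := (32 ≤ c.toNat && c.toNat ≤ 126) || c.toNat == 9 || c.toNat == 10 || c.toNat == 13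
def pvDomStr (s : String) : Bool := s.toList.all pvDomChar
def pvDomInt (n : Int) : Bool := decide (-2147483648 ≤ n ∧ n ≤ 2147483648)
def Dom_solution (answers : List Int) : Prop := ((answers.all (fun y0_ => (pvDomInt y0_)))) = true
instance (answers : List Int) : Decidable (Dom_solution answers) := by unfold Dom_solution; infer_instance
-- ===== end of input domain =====

-- B replaces A's interleaved per-element comparison against three cyclic patterns by a
-- frequency table keyed by (index mod 40, answer) — 40 = lcm of the pattern lengths —
-- from which each score is read with 40 lookups (objective: alternative algorithm).

-- ===== PORT A =====
-- loop body of A's single pass: the three 'if … : score[k] += 1' statements on the counter triple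
def pvStepA (t : Int × Int × Int) (p : Int × Int) : Int × Int × Int :=
  let s0 := if p.2 = PySem.List.pyGetD [1, 2, 3, 4, 5] (PySem.Int.mod p.1 (([1, 2, 3, 4, 5] : List Int).length : Int)) 0 then t.1 + 1 else t.1
  let s1 := if p.2 = PySem.List.pyGetD [2, 1, 2, 3, 2, 4, 2, 5] (PySem.Int.mod p.1 (([2, 1, 2, 3, 2, 4, 2, 5] : List Int).length : Int)) 0 then t.2.1 + 1 else t.2.1
  let s2 := if p.2 = PySem.List.pyGetD [3, 3, 1, 1, 2, 2, 4, 4, 5, 5] (PySem.Int.mod p.1 (([3, 3, 1, 1, 2, 2, 4, 4, 5, 5] : List Int).length : Int)) 0 then t.2.2 + 1 else t.2.2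
  (s0, s1, s2)

-- one pass over enumerate(answers) updating the three counters together, then the append loop
def solution (answers : List Int) : List Int :=
  let score := (PySem.List.enumerate answers 0).foldl pvStepA (0, 0, 0)
  let scoreList : List Int := [score.1, score.2.1, score.2.2]
  (PySem.List.enumerate scoreList 0).foldl
    (fun acc q =>
      if q.2 = (PySem.List.max? scoreList (fun x => x)).getD 0 then acc ++ [q.1 + 1] else acc) []

-- ===== PORT B =====
-- freq[key] = freq.get(key, 0) + 1 over keys (i % 40, a); then scores by 40 table lookups per pattern
def solution_alt (answers : List Int) : List Int :=
  let freq : PySem.Dict (Int × Int) Int :=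
    (PySem.List.enumerate answers 0).foldl
      (fun d ia => d.modify (PySem.Int.mod ia.1 40, ia.2) 0 (· + 1)) PySem.Dict.empty
  let patterns : List (List Int) :=
    [[1, 2, 3, 4, 5], [2, 1, 2, 3, 2, 4, 2, 5], [3, 3, 1, 1, 2, 2, 4, 4, 5, 5]]
  let scores : List Int := patterns.map (fun p =>
    ((PySem.List.pyRange 0 40 1).map (fun r =>
      freq.getD (r, PySem.List.pyGetD p (PySem.Int.mod r (p.length : Int)) 0) 0)).sum)
  let best : Int := (PySem.List.max? scores (fun x => x)).getD 0
  ((PySem.List.pyRange 0 3 1).filter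
      (fun k => PySem.List.pyGetD scores k 0 == best)).map (fun k => k + 1)

-- ===== PRECONDITION & SPEC =====
def Spec_solution (answers : List Int) (out : List Int) : Prop := out = solution_alt answers
instance (answers : List Int) (out : List Int) : Decidable (Spec_solution answers out) := by unfold Spec_solution; infer_instance

-- ===== CLAIM (what is proved, stated in full; the proofs are below) =====
def Claim_equal_solution : Prop := ∀ (answers : List Int), Dom_solution answers → Spec_solution answers (solution answers)

-- ===== LEMMAS AND PROOFS =====

-- A's count of matches of pattern p on xs, indices starting at s
def pvCnt (p : List Int) (xs : List Int) (s : Int) : Int :=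
  ((PySem.List.enumerate xs s).map (fun ia =>
    if ia.2 = PySem.List.pyGetD p (PySem.Int.mod ia.1 (p.length : Int)) 0 then (1 : Int) else 0)).sum

lemma pvCnt_cons (p : List Int) (x : Int) (xs : List Int) (s : Int) :
    pvCnt p (x :: xs) s =
      (if x = PySem.List.pyGetD p (PySem.Int.mod s (p.length : Int)) 0 then (1 : Int) else 0)
        + pvCnt p xs (s + 1) := by
  simp [pvCnt, PySem.List.enumerate_cons]

-- A's interleaved fold is the triple of the three independent match counts
lemma pvFold_eq (xs : List Int) (s : Int) (i0 i1 i2 : Int) :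
    (PySem.List.enumerate xs s).foldl pvStepA (i0, i1, i2)
    = (i0 + pvCnt [1, 2, 3, 4, 5] xs s,
       i1 + pvCnt [2, 1, 2, 3, 2, 4, 2, 5] xs s,
       i2 + pvCnt [3, 3, 1, 1, 2, 2, 4, 4, 5, 5] xs s) := by
  induction xs generalizing s i0 i1 i2 with
  | nil => simp [PySem.List.enumerate_nil, pvCnt]
  | cons x xs ih =>
    simp only [PySem.List.enumerate_cons, List.foldl_cons, pvCnt_cons, pvStepA, ih]
    refine Prod.ext ?_ (Prod.ext ?_ ?_) <;> simp <;> split_ifs <;> ring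

-- a 0/1 pair-indicator sum over a duplicate-free list picks out the single matching index
lemma pvSum_pair_ind (x : Int) (v : Int → Int) :
    ∀ l : List Int, l.Nodup → ∀ m : Int, m ∈ l →
      (l.map (fun r => if (r, v r) = (m, x) then (1 : Int) else 0)).sum
        = if x = v m then 1 else 0 := by
  intro l
  induction l with
  | nil => intro _ m hm; cases hm
  | cons a l ih =>
    intro hnd m hm
    simp only [List.map_cons, List.sum_cons]
    rcases List.mem_cons.mp hm with h | h
    · subst h
      have hz : (l.map (fun r => if (r, v r) = (m, x) then (1 : Int) else 0)).sum = 0 := by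
        apply List.sum_eq_zero
        intro y hy
        rcases List.mem_map.mp hy with ⟨r, hr, rfl⟩
        have hra : r ≠ m := fun e => (List.nodup_cons.mp hnd).1 (e ▸ hr)
        simp [Prod.ext_iff, hra]
      rw [hz]
      by_cases hv : x = v m <;> simp [Prod.ext_iff, hv, eq_comm]
    · have hne : a ≠ m := fun e => (List.nodup_cons.mp hnd).1 (e ▸ h)
      rw [ih (List.nodup_cons.mp hnd).2 m h]
      simp [Prod.ext_iff, hne]

-- the 40-residue table readout of the key list equals the direct match count
lemma pvKey_sum (p : List Int) (hdvd : (p.length : Int) ∣ 40) (hpos : 0 < (p.length : Int))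
    (xs : List Int) (s : Int) :
    ((PySem.List.pyRange 0 40 1).map (fun r =>
        ((((PySem.List.enumerate xs s).map (fun ia => (PySem.Int.mod ia.1 40, ia.2))).count
            (r, PySem.List.pyGetD p (PySem.Int.mod r (p.length : Int)) 0) : Nat) : Int))).sum
      = pvCnt p xs s := by
  induction xs generalizing s with
  | nil =>
    simp [PySem.List.enumerate_nil, pvCnt]
  | cons x xs ih =>
    have hm40 : PySem.Int.mod s 40 = s % 40 := PySem.Int.mod_eq_emod_of_pos (by norm_num)
    have hmem : PySem.Int.mod s 40 ∈ PySem.List.pyRange 0 40 1 := by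
      rw [PySem.List.mem_pyRange_one, hm40]
      constructor
      · exact Int.emod_nonneg s (by norm_num)
      · exact Int.emod_lt_of_pos s (by norm_num)
    have hcollapse :
        PySem.Int.mod (PySem.Int.mod s 40) (p.length : Int) = PySem.Int.mod s (p.length : Int) := by
      rw [hm40, PySem.Int.mod_eq_emod_of_pos hpos, PySem.Int.mod_eq_emod_of_pos hpos]
      exact Int.emod_emod_of_dvd s hdvd
    calc
      ((PySem.List.pyRange 0 40 1).map (fun r =>
          ((((PySem.List.enumerate (x :: xs) s).map (fun ia => (PySem.Int.mod ia.1 40, ia.2))).count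
              (r, PySem.List.pyGetD p (PySem.Int.mod r (p.length : Int)) 0) : Nat) : Int))).sum
        = ((PySem.List.pyRange 0 40 1).map (fun r =>
              (if (r, PySem.List.pyGetD p (PySem.Int.mod r (p.length : Int)) 0)
                  = (PySem.Int.mod s 40, x) then (1 : Int) else 0)
              + ((((PySem.List.enumerate xs (s + 1)).map (fun ia => (PySem.Int.mod ia.1 40, ia.2))).count
                  (r, PySem.List.pyGetD p (PySem.Int.mod r (p.length : Int)) 0) : Nat) : Int))).sum := by
          apply congrArg List.sum
          apply List.map_congr_left
          intro r _
          simp only [PySem.List.enumerate_cons, List.map_cons, List.count_cons, beq_iff_eq]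
          by_cases hk : (r, PySem.List.pyGetD p (PySem.Int.mod r (p.length : Int)) 0)
              = (PySem.Int.mod s 40, x)
          · rw [if_pos hk, if_pos hk.symm]; push_cast; ring
          · rw [if_neg hk, if_neg (fun h => hk h.symm)]; push_cast; ring
      _ = pvCnt p (x :: xs) s := by
          rw [List.sum_map_add]
          rw [ih (s + 1)]
          rw [pvSum_pair_ind x (fun r => PySem.List.pyGetD p (PySem.Int.mod r (p.length : Int)) 0)
                (PySem.List.pyRange 0 40 1) (PySem.List.nodup_pyRange_one 0 40)
                (PySem.Int.mod s 40) hmem]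
          rw [pvCnt_cons, hcollapse]
      

-- B's whole per-pattern table readout (fold-built dict, then 40 lookups) equals the match count
lemma pvScoreB_eq (p : List Int) (hdvd : (p.length : Int) ∣ 40) (hpos : 0 < (p.length : Int))
    (answers : List Int) :
    ((PySem.List.pyRange 0 40 1).map (fun r =>
        ((PySem.List.enumerate answers 0).foldl
            (fun d ia => d.modify (PySem.Int.mod ia.1 40, ia.2) 0 (· + 1))
            (PySem.Dict.empty : PySem.Dict (Int × Int) Int)).getD
          (r, PySem.List.pyGetD p (PySem.Int.mod r (p.length : Int)) 0) 0)).sum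
      = pvCnt p answers 0 := by
  have hfreq :
      (PySem.List.enumerate answers 0).foldl
          (fun d ia => d.modify (PySem.Int.mod ia.1 40, ia.2) 0 (· + 1))
          (PySem.Dict.empty : PySem.Dict (Int × Int) Int)
        = PySem.Dict.counter
            ((PySem.List.enumerate answers 0).map (fun ia => (PySem.Int.mod ia.1 40, ia.2))) := by
    rw [PySem.Dict.counter_eq_foldl, List.foldl_map]
  rw [hfreq]
  simp only [PySem.Dict.getD_counter]
  exact pvKey_sum p hdvd hpos answers 0

set_option maxRecDepth 8000 in
-- A's append loop over the 3 scores equals B's filter-then-map over range(3)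
lemma pvFinal_eq (c1 c2 c3 : Int) :
    (PySem.List.enumerate [c1, c2, c3] 0).foldl
      (fun acc q =>
        if q.2 = (PySem.List.max? [c1, c2, c3] (fun x => x)).getD 0 then acc ++ [q.1 + 1] else acc) []
    = ((PySem.List.pyRange 0 3 1).filter
        (fun k => PySem.List.pyGetD [c1, c2, c3] k 0 == (PySem.List.max? [c1, c2, c3] (fun x => x)).getD 0)).map
        (fun k => k + 1) := by
  have hr : PySem.List.pyRange 0 3 1 = [0, 1, 2] := by decide
  have g0 : PySem.List.pyGetD [c1, c2, c3] 0 0 = c1 := rfl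
  have g1 : PySem.List.pyGetD [c1, c2, c3] 1 0 = c2 := rfl
  have g2 : PySem.List.pyGetD [c1, c2, c3] 2 0 = c3 := rfl
  rw [hr]
  simp only [PySem.List.enumerate_cons, PySem.List.enumerate_nil, List.foldl_cons, List.foldl_nil,
    List.filter_cons, List.filter_nil, beq_iff_eq, g0, g1, g2]
  split_ifs <;> norm_num

-- ===== VERDICT (by name: the statement is the Claim_ definition above) =====
theorem solution_spec : Claim_equal_solution := by
  intro answers _
  show solution answers = solution_alt answers
  simp only [solution, solution_alt, List.map_cons, List.map_nil]
  rw [pvScoreB_eq [1, 2, 3, 4, 5] (by norm_num) (by norm_num) answers,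
      pvScoreB_eq [2, 1, 2, 3, 2, 4, 2, 5] (by norm_num) (by norm_num) answers,
      pvScoreB_eq [3, 3, 1, 1, 2, 2, 4, 4, 5, 5] (by norm_num) (by norm_num) answers,
      pvFold_eq answers 0 0 0 0]
  simp only [zero_add]
  exact pvFinal_eq _ _ _
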